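-- pv_equiv track=rewrite | github.com/antidude900/ProjectEuler | Problemd14.py | length_of_sequence_all
-- ===== SOURCE A (Python) =====
-- def length_of_sequence_nth(num, lengths):
--     """Calculate the length of sequence for a given number num."""
--     temp = num
--     length = 0
--
--     while temp >= num:
--         if temp % 2 == 0:  # If even
--             temp //= 2
--         else:  # If odd
--             temp = 3 * temp + 1
--         length += 1
--
--     """
--     if temp<num i.e while finding numbers of the sequence, we got a number such that it is less than the number whose length is being evaluated
--     as we are finding sequence length of all numbers in increasing order, we will already have the sequence of that lesser number.
--     So we just add its length on the current length of the sequence to find the full length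
--     """
--
--     length += lengths[temp]
--     return length
--
-- def length_of_sequence_all(max_val):
--     """Calculate the length of sequence of all numbers upto max_val"""
--     lengths = [0, 1]  # stores the length of each number(index represent respective number)
--     max_length = 0   # stores track of the longest length
--     longest_len_nums = [0] * (max_val + 1)  #stores the number which has the longest length among the n(index represents n) numbers
--     longest_len_nums[1] = 1 #as 1 is already 1, we dont have to find the sequence and its length is in default 1
--
--     for num in range(2, max_val + 1):
--         length = length_of_sequence_nth(num, lengths) #finding length of number from 2 to max_val(0 and 1 are already predetermined]
--         lengths.append(length) #append the length of the respective num
--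
--         """
--         To explain the below code, lets first take an example:
--         Lets us write the first 7 values(0 to 6) of longest_len_nums array and then explain it:
--         longest_len_nums = [0, 1, 2, 3, 3, 3, 6]
--
--         Collatz sequence is only possible for natural numbers. So using 0 only to make index correspond to the respective number
--
--         Here 1 has collatz sequence 1. So its length is 1.
--         As among the numbers upto 1, the one with the longest length is 1. So longest_len_nums[1] is set to 1 in default.
--
--         Here 2 has collatz sequence 2→1. So its length is 2.
--         As among the numbers upto 2, the one with the longest number is 2. So longest len_num[2] is set to 2
--
--         Here 3 has collatz sequence 3→10→5→16→8→4→2→1. So its length is 8.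
--         As among the numbers upto 3, the one with the longest number is 3. So longest len_num[3] is set to 3.
--
--         Here 4 has collatz sequence 4→2→1. So its length is 3.
--         As among the numbers upto 4, the one with the longest number is 3. So longest len_num[4] is set to 3.
--
--         Here 5 has collatz sequence 5→16→8→4→2→1. So its length is 6.
--         As among the numbers upto 5, the one with the longest number is 3. So longest len_num[5] is set to 3.
--
--         Here 6 has collatz sequence 6→3→10→5→16→8→4→2→1. So its length is 9.
--         As among the numbers upto 6, the one with the longest number is 6. So longest len_num[5] is set to 6.
--         """
--
--         #the below code does the same thing as explained aboved
--         if length >= max_length: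
--             max_length = length
--             longest_len_nums[num] = num
--             max_length_num = num
--
--
--         longest_len_nums[num] = max_length_num
--
--      #if would have been a single test question, then would have return max_length_num instead of longest_len_nums
--     return longest_len_nums
-- ===== SOURCE B (Python) =====
-- def length_of_sequence_all(max_val):
--     """Collatz record holders up to max_val, by memoize-ahead: when a number's
--     length is unknown, walk its chain collecting the whole path, then backfill
--     the lengths of EVERY path value <= max_val into the table; numbers whose
--     length was already backfilled by an earlier path are never walked at all."""
--     lengths = [0] * (max_val + 1)   # 0 = not yet computed (true lengths are >= 1)
--     lengths[1] = 1
--     longest = [0] * (max_val + 1)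
--     longest[1] = 1
--     max_length = 0
--     for num in range(2, max_val + 1):
--         if lengths[num] == 0:
--             path = []
--             t = num
--             while t >= num:
--                 path.append(t)
--                 t = t // 2 if t % 2 == 0 else 3 * t + 1
--             acc = lengths[t]          # t < num, already computed
--             for v in reversed(path):  # backfill the whole path
--                 acc += 1
--                 if v <= max_val:
--                     lengths[v] = acc
--         length = lengths[num]
--         if length >= max_length:
--             max_length = length
--             best = num
--         longest[num] = best
--     return longest
-- ===== Notes on version B (the rewrite author's own statement) =====
-- stated objective: alternative
-- what changed: A computes every number's length by its own walk appended to a growing list; B memoizes ahead into a preallocated table: a number already filled by an earlier chain is never walked at all, and when a walk does happen B collects the whole path and backfills the length of every path value <= max_val (not just the start), so the set of walks performed and the table contents genuinely differ.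
-- outside the precondition, e.g. on length_of_sequence_all(0): A raises IndexError, B raises IndexError
import Mathlib
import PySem

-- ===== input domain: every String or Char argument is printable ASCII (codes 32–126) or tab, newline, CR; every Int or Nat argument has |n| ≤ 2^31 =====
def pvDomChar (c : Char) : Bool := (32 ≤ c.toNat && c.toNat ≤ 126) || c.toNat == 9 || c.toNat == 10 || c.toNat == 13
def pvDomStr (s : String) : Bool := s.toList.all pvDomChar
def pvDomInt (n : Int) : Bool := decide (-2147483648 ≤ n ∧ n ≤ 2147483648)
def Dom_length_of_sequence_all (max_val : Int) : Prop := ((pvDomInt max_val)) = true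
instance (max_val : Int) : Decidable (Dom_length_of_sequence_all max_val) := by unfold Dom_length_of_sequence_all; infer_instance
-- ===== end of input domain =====

-- B memoizes ahead: it backfills the length of every value on a walked chain
-- (not just its start) into a preallocated table and never walks a number the
-- table already covers; objective: alternative (not measured faster).

-- Fuel guard for the Collatz-style while loops of BOTH Pythons (they carry no
-- bound of their own; the guard only makes the recursion total).
def pvFuel : Nat := 4294967296

-- one Collatz step (the shared if/else assignment of both Pythons)
def pvStep (t : Int) : Int := if PySem.Int.mod t 2 = 0 then PySem.Int.floordiv t 2 else 3 * t + 1

-- ===== PORT A =====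
-- inner 'while temp >= num' loop of length_of_sequence_nth; exits with (temp, length)
def pvAWhile : Nat → Int → Int → Int → Option (Int × Int)
  | 0, _, _, _ => none
  | fuel+1, num, temp, length =>
    if temp ≥ num then pvAWhile fuel num (pvStep temp) (length + 1)
    else some (temp, length)

-- length_of_sequence_nth: the exit index temp lies in [1, num), inside the
-- length-num list 'lengths' on every reachable call, so pyGetD is exact here
def pvLenNth (num : Int) (lengths : List Int) : Option Int :=
  match pvAWhile pvFuel num num 0 with
  | none => none
  | some (temp, length) => some (length + PySem.List.pyGetD lengths temp 0)

-- the 'for num in range(2, max_val + 1)' loop, as countdown recursion on the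
-- number of remaining iterations; writes at index num ∈ [2, max_val] into the
-- length-(max_val+1) list are in range on every reachable call (pySetD exact)
def pvALoop : Nat → Int → List Int → Int → List Int → Option Int → Option (List Int)
  | 0, _, _, _, longest, _ => some longest
  | c+1, num, lengths, maxLength, longest, maxLengthNum =>
    match pvLenNth num lengths with
    | none => none
    | some length =>
      let lengths' := lengths ++ [length]
      let s :=
        if length ≥ maxLength then (length, some num, PySem.List.pySetD longest num num)
        else (maxLength, maxLengthNum, longest)
      match s.2.1 with
      | none => none   -- Python's UnboundLocalError on max_length_num; unreachable from the entry state
      | some m => pvALoop c (num + 1) lengths' s.1 (PySem.List.pySetD s.2.2 num m) s.2.1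

def length_of_sequence_all (max_val : Int) : List Int :=
  match PySem.List.pySet? (List.replicate (max_val + 1).toNat 0) 1 1 with  -- longest_len_nums[1] = 1
  | none => []   -- IndexError in Python (max_val ≤ 0)
  | some longest0 => (pvALoop (max_val - 1).toNat 2 [0, 1] 0 longest0 none).getD []

-- ===== PORT B =====
-- 'while t >= num' walk collecting the whole path; exits with (path, t)
def pvBWhile : Nat → Int → Int → List Int → Option (List Int × Int)
  | 0, _, _, _ => none
  | fuel+1, num, t, path =>
    if t ≥ num then pvBWhile fuel num (pvStep t) (path ++ [t])
    else some (path, t)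

-- 'for v in reversed(path): acc += 1; if v <= max_val: lengths[v] = acc'
-- (every written index v satisfies num ≤ v ≤ max_val, in range, so pySetD is exact)
def pvBackfill (m : Int) : List Int → Int → List Int → List Int
  | [], _, lengths => lengths
  | v :: rest, acc, lengths =>
    pvBackfill m rest (acc + 1) (if v ≤ m then PySem.List.pySetD lengths v (acc + 1) else lengths)

-- the 'for num in range(2, max_val + 1)' loop of B: skip-or-walk-and-backfill,
-- then the same record tracking ('best' mirrored as an Option like A's)
def pvBLoop (m : Int) : Nat → Int → List Int → Int → List Int → Option Int → Option (List Int)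
  | 0, _, _, _, longest, _ => some longest
  | c+1, num, lengths, maxLength, longest, bestOpt =>
    let step1 : Option (List Int) :=
      if PySem.List.pyGetD lengths num 0 = 0 then
        match pvBWhile pvFuel num num [] with
        | none => none
        | some (path, t) => some (pvBackfill m path.reverse (PySem.List.pyGetD lengths t 0) lengths)
      else some lengths
    match step1 with
    | none => none
    | some lengths' =>
      let length := PySem.List.pyGetD lengths' num 0
      let s := if length ≥ maxLength then (length, some num) else (maxLength, bestOpt)
      match s.2 with
      | none => none   -- Python's UnboundLocalError on best; unreachable from the entry state
      | some b => pvBLoop m c (num + 1) lengths' s.1 (PySem.List.pySetD longest num b) s.2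

def length_of_sequence_all_alt (max_val : Int) : List Int :=
  match PySem.List.pySet? (List.replicate (max_val + 1).toNat 0) 1 1 with  -- lengths[1] = 1
  | none => []   -- IndexError in Python (max_val ≤ 0)
  | some lengths0 =>
    (pvBLoop max_val (max_val - 1).toNat 2 lengths0 0
      (PySem.List.pySetD (List.replicate (max_val + 1).toNat 0) 1 1) none).getD []

-- ===== PRECONDITION & SPEC =====
-- Pre_: Python A raises IndexError (longest_len_nums[1] = 1) exactly when max_val ≤ 0
def Pre_length_of_sequence_all (max_val : Int) : Prop := 1 ≤ max_val
instance (max_val : Int) : Decidable (Pre_length_of_sequence_all max_val) := by unfold Pre_length_of_sequence_all; infer_instance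
def pvWitness_length_of_sequence_all : Int := 5

def Spec_length_of_sequence_all (max_val : Int) (out : List Int) : Prop := out = length_of_sequence_all_alt max_val
instance (max_val : Int) (out : List Int) : Decidable (Spec_length_of_sequence_all max_val out) := by unfold Spec_length_of_sequence_all; infer_instance

-- ===== CLAIM (what is proved, stated in full; the proofs are below) =====
def Claim_equal_length_of_sequence_all : Prop := ∀ (max_val : Int), Dom_length_of_sequence_all max_val → Pre_length_of_sequence_all max_val → Spec_length_of_sequence_all max_val (length_of_sequence_all max_val)

-- ===== LEMMAS AND PROOFS =====

-- small indexing facts used throughout (specific to how the ports address their tables)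
lemma pvGetNonneg (xs : List Int) (i d : Int) (h : 0 ≤ i) :
    PySem.List.pyGetD xs i d = xs.getD i.toNat d := by
  have hc := PySem.List.pyGetD_natCast (xs := xs) (n := i.toNat) (d := d)
  rw [Int.toNat_of_nonneg h] at hc
  exact hc

lemma pvSetNonneg (xs : List Int) (i v : Int) (h : 0 ≤ i) :
    PySem.List.pySetD xs i v = xs.set i.toNat v := by
  rw [PySem.List.pySetD_of_nonneg]; exact h

lemma pvGetDSetNe (xs : List Int) (m k : Nat) (v d : Int) (h : m ≠ k) :
    (xs.set m v).getD k d = xs.getD k d := by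
  simp [List.getD, List.getElem?_set_ne h]

lemma pvGetDSetSelf (xs : List Int) (m : Nat) (v d : Int) (h : m < xs.length) :
    (xs.set m v).getD m d = v := by
  simp [List.getD, h]

lemma pvGetDAppendLt (xs ys : List Int) (k : Nat) (d : Int) (h : k < xs.length) :
    (xs ++ ys).getD k d = xs.getD k d := by
  simp [List.getD, List.getElem?_append_left h]

lemma pvGetDAppendSelf (xs : List Int) (x d : Int) :
    (xs ++ [x]).getD xs.length d = x := by
  simp [List.getD]

lemma pvPyGetDAppendLt (A : List Int) (x k : Int) (hk : 0 ≤ k) (h : k.toNat < A.length) :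
    PySem.List.pyGetD (A ++ [x]) k 0 = PySem.List.pyGetD A k 0 := by
  rw [pvGetNonneg (A ++ [x]) k 0 hk, pvGetNonneg A k 0 hk]
  exact pvGetDAppendLt _ _ _ _ h

lemma pvPyGetDAppendSelf (A : List Int) (x k : Int) (hk : 0 ≤ k) (h : k.toNat = A.length) :
    PySem.List.pyGetD (A ++ [x]) k 0 = x := by
  rw [pvGetNonneg (A ++ [x]) k 0 hk, h]
  exact pvGetDAppendSelf A x 0

-- A's counting walk and B's path-collecting walk simulate each other step for step
lemma pvWalk_sim (fuel : Nat) : ∀ (n t length : Int) (path : List Int),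
    pvAWhile fuel n t length =
      (pvBWhile fuel n t path).map
        (fun r : List Int × Int => (r.2, length + ((r.1.length : Int) - (path.length : Int)))) := by
  induction fuel with
  | zero => intro n t length path; simp [pvAWhile, pvBWhile]
  | succ f ih =>
    intro n t length path
    simp only [pvAWhile, pvBWhile]
    by_cases h : t ≥ n
    · rw [if_pos h, if_pos h, ih _ _ (length + 1) (path ++ [t])]
      cases pvBWhile f n (pvStep t) (path ++ [t]) with
      | none => simp
      | some r => simp; ring
    · rw [if_neg h, if_neg h]; simp

-- the collected path is exactly the iterates of pvStep, all ≥ num, exiting below num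
lemma pvBWhile_iter (fuel : Nat) : ∀ (n t0 : Int) (p path : List Int) (e : Int),
    pvBWhile fuel n t0 p = some (path, e) →
    ∃ j : Nat, j < fuel ∧ path = p ++ (List.range j).map (fun i => pvStep^[i] t0) ∧
      e = pvStep^[j] t0 ∧ (∀ i, i < j → n ≤ pvStep^[i] t0) ∧ e < n := by
  induction fuel with
  | zero => intro n t0 p path e h; simp [pvBWhile] at h
  | succ f ih =>
    intro n t0 p path e h
    simp only [pvBWhile] at h
    by_cases hg : t0 ≥ n
    · rw [if_pos hg] at h
      obtain ⟨j, hjf, hpath, he, hmid, hlt⟩ := ih n (pvStep t0) (p ++ [t0]) path e h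
      refine ⟨j + 1, by omega, ?_, ?_, ?_, hlt⟩
      · rw [hpath, List.range_succ_eq_map]
        simp [Function.comp_def, Function.iterate_succ_apply]
      · rw [he, Function.iterate_succ_apply]
      · intro i hi
        cases i with
        | zero => simpa using hg
        | succ i' =>
          have := hmid i' (by omega)
          rwa [← Function.iterate_succ_apply] at this
    · rw [if_neg hg] at h
      simp at h
      obtain ⟨rfl, rfl⟩ := h
      exact ⟨0, by omega, by simp, by simp, by omega, by omega⟩

-- the walk succeeds as soon as some iterate within fuel drops below num
lemma pvBWhile_some_of_iter (fuel : Nat) : ∀ (n t0 : Int) (p : List Int),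
    (∃ j : Nat, j < fuel ∧ pvStep^[j] t0 < n) → ∃ r, pvBWhile fuel n t0 p = some r := by
  induction fuel with
  | zero => intro n t0 p ⟨j, hj, _⟩; omega
  | succ f ih =>
    intro n t0 p ⟨j, hj, hlt⟩
    simp only [pvBWhile]
    by_cases hg : t0 ≥ n
    · rw [if_pos hg]
      apply ih
      cases j with
      | zero => simp at hlt; omega
      | succ j' => exact ⟨j', by omega, by rwa [← Function.iterate_succ_apply]⟩
    · rw [if_neg hg]; exact ⟨_, rfl⟩

-- 'reaches 1 in L steps (inclusive)' — the canonical Collatz length, fueled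
def pvFL : Nat → Int → Option Int
  | 0, _ => none
  | f+1, t => if t = 1 then some 1 else (pvFL f (pvStep t)).map (· + 1)

def pvR1 (k L : Int) : Prop := ∃ f, pvFL f k = some L

lemma pvFL_mono : ∀ (f f' : Nat) (t L : Int), f ≤ f' → pvFL f t = some L → pvFL f' t = some L := by
  intro f
  induction f with
  | zero => intro f' t L _ h; simp [pvFL] at h
  | succ f ih =>
    intro f' t L hle h
    obtain ⟨f'', rfl⟩ : ∃ f'', f' = f'' + 1 := ⟨f' - 1, by omega⟩
    simp only [pvFL] at h ⊢
    by_cases h1 : t = 1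
    · rwa [if_pos h1] at h ⊢
    · rw [if_neg h1] at h ⊢
      cases hf : pvFL f (pvStep t) with
      | none => rw [hf] at h; simp at h
      | some L0 =>
        rw [hf] at h
        rw [ih f'' (pvStep t) L0 (by omega) hf]
        simpa using h

lemma pvR1_unique (k L L' : Int) (h : pvR1 k L) (h' : pvR1 k L') : L = L' := by
  obtain ⟨f, hf⟩ := h
  obtain ⟨g, hg⟩ := h'
  have h1 := pvFL_mono f (f + g) k L (by omega) hf
  have h2 := pvFL_mono g (f + g) k L' (by omega) hg
  rw [h1] at h2
  simpa using h2

lemma pvR1_one : pvR1 1 1 := ⟨1, rfl⟩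

lemma pvR1_iter : ∀ (j : Nat) (v L : Int), (∀ i, i < j → pvStep^[i] v ≠ 1) →
    pvR1 (pvStep^[j] v) L → pvR1 v (L + j) := by
  intro j
  induction j with
  | zero => intro v L _ h; simpa using h
  | succ j ih =>
    intro v L hne h
    rw [Function.iterate_succ_apply] at h
    have h' := ih (pvStep v) L (fun i hi => by
      have := hne (i + 1) (by omega)
      rwa [Function.iterate_succ_apply] at this) h
    obtain ⟨f, hf⟩ := h'
    refine ⟨f + 1, ?_⟩
    have hv1 : v ≠ 1 := by simpa using hne 0 (by omega)
    simp only [pvFL, if_neg hv1, hf, Option.map_some]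
    congr 1
    push_cast
    ring

-- every filled table entry of B holds the canonical length and a below-self witness
def pvGoodT (m : Int) (T : List Int) : Prop :=
  ∀ k : Int, 2 ≤ k → k ≤ m → PySem.List.pyGetD T k 0 ≠ 0 →
    pvR1 k (PySem.List.pyGetD T k 0) ∧ ∃ j : Nat, j < pvFuel ∧ pvStep^[j] k < k

-- the loop invariant tying A's growing list to B's preallocated table
def pvInv (m num : Int) (A T : List Int) : Prop :=
  (A.length : Int) = num ∧ (T.length : Int) = m + 1 ∧
  (∀ k : Int, 1 ≤ k → k < num →
    PySem.List.pyGetD T k 0 = PySem.List.pyGetD A k 0 ∧ pvR1 k (PySem.List.pyGetD A k 0)) ∧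
  pvGoodT m T

-- what one backfill pass does to the table: length kept, goodness kept,
-- entries below num untouched, and the walked number itself set to LE + S
lemma pvBackfill_spec (m num E LE : Int) (S : Nat)
    (hnum : 2 ≤ num) (hm : num ≤ m) (hS : S < pvFuel)
    (hE : pvStep^[S] num = E) (hElow : E < num) (hRE : pvR1 E LE)
    (hge : ∀ i, i < S → num ≤ pvStep^[i] num) :
    ∀ (s : Nat), s ≤ S → ∀ (T : List Int), (T.length : Int) = m + 1 → pvGoodT m T →
      ((pvBackfill m (((List.range s).map (fun i => pvStep^[i] num)).reverse) (LE + ((S - s : Nat) : Int)) T).length = T.length) ∧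
      pvGoodT m (pvBackfill m (((List.range s).map (fun i => pvStep^[i] num)).reverse) (LE + ((S - s : Nat) : Int)) T) ∧
      (∀ k : Int, 0 ≤ k → k < num →
        PySem.List.pyGetD (pvBackfill m (((List.range s).map (fun i => pvStep^[i] num)).reverse) (LE + ((S - s : Nat) : Int)) T) k 0 = PySem.List.pyGetD T k 0) ∧
      (1 ≤ s →
        PySem.List.pyGetD (pvBackfill m (((List.range s).map (fun i => pvStep^[i] num)).reverse) (LE + ((S - s : Nat) : Int)) T) num 0 = LE + (S : Int)) := by
  intro s
  induction s with
  | zero =>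
    intro _ T hTlen hGood
    refine ⟨?_, ?_, ?_, ?_⟩
    · simp [pvBackfill]
    · simpa [pvBackfill] using hGood
    · intro k _ _; simp [pvBackfill]
    · intro h; omega
  | succ s ih =>
    intro hsS T hTlen hGood
    have hrw : (((List.range (s+1)).map (fun i => pvStep^[i] num)).reverse)
        = pvStep^[s] num :: ((List.range s).map (fun i => pvStep^[i] num)).reverse := by
      rw [List.range_succ]; simp
    have hab : (LE + ((S - (s+1) : Nat) : Int)) + 1 = LE + ((S - s : Nat) : Int) := by omega
    set v := pvStep^[s] num with hv
    have hvge : num ≤ v := hge s (by omega)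
    have hv2 : (2:Int) ≤ v := by omega
    have hR1v : pvR1 v (LE + ((S - s : Nat) : Int)) := by
      have hEv : pvStep^[S - s] v = E := by
        rw [hv, ← Function.iterate_add_apply]
        have : S - s + s = S := by omega
        rw [this, hE]
      have hne : ∀ i, i < S - s → pvStep^[i] v ≠ 1 := by
        intro i hi
        rw [hv, ← Function.iterate_add_apply]
        have := hge (i + s) (by omega)
        omega
      have := pvR1_iter (S - s) v LE hne (by rw [hEv]; exact hRE)
      exact this
    have hwit : ∃ j : Nat, j < pvFuel ∧ pvStep^[j] v < v := by
      refine ⟨S - s, by omega, ?_⟩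
      rw [hv, ← Function.iterate_add_apply]
      have : S - s + s = S := by omega
      rw [this, hE]; omega
    rw [hrw]
    simp only [pvBackfill, hab]
    by_cases hvm : v ≤ m
    · rw [if_pos hvm]
      have hvnat : v.toNat < T.length := by omega
      have hset : PySem.List.pySetD T v (LE + ((S - s : Nat) : Int))
          = T.set v.toNat (LE + ((S - s : Nat) : Int)) := pvSetNonneg _ _ _ (by omega)
      have hT1len : ((T.set v.toNat (LE + ((S - s : Nat) : Int))).length : Int) = m + 1 := by
        simpa using hTlen
      have hT1good : pvGoodT m (T.set v.toNat (LE + ((S - s : Nat) : Int))) := by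
        intro k hk2 hkm hkne
        rw [pvGetNonneg _ _ _ (by omega)] at hkne ⊢
        by_cases hkv : k = v
        · subst hkv
          rw [pvGetDSetSelf _ _ _ _ hvnat] at hkne ⊢
          exact ⟨hR1v, hwit⟩
        · have : v.toNat ≠ k.toNat := by omega
          rw [pvGetDSetNe _ _ _ _ _ this] at hkne ⊢
          have := hGood k hk2 hkm (by rw [pvGetNonneg _ _ _ (by omega)]; exact hkne)
          rwa [pvGetNonneg _ _ _ (by omega)] at this
      obtain ⟨ihl, ihg, ihu, ihn⟩ := ih (by omega) _ hT1len hT1good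
      rw [hset]
      refine ⟨by rw [ihl]; simp, ihg, ?_, ?_⟩
      · intro k hk0 hkn
        rw [ihu k hk0 hkn, pvGetNonneg _ _ _ hk0, pvGetNonneg _ _ _ hk0,
          pvGetDSetNe _ _ _ _ _ (by omega)]
      · intro _
        rcases Nat.eq_zero_or_pos s with hs0 | hs1
        · subst hs0
          have hvnum : v = num := by rw [hv]; simp
          simp only [List.range_zero, List.map_nil, List.reverse_nil, pvBackfill]
          rw [pvGetNonneg _ _ _ (by omega), hvnum,
            pvGetDSetSelf _ _ _ _ (by omega : num.toNat < T.length)]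
          omega
        · rw [ihn hs1]
    · rw [if_neg hvm]
      obtain ⟨ihl, ihg, ihu, ihn⟩ := ih (by omega) T hTlen hGood
      refine ⟨ihl, ihg, ihu, ?_⟩
      intro _
      rcases Nat.eq_zero_or_pos s with hs0 | hs1
      · exfalso
        have hvnum : v = num := by rw [hv, hs0]; simp
        omega
      · exact ihn hs1

-- positivity of the Collatz step and its iterates
lemma pvStep_pos (x : Int) (hx : 1 ≤ x) : 1 ≤ pvStep x := by
  unfold pvStep
  by_cases hp : PySem.Int.mod x 2 = 0
  · rw [if_pos hp, PySem.Int.floordiv_eq_ediv_of_pos (by norm_num)]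
    rw [PySem.Int.mod_eq_emod_of_pos (by norm_num)] at hp
    omega
  · rw [if_neg hp]; omega

lemma pvIter_pos (j : Nat) (x : Int) (hx : 1 ≤ x) : 1 ≤ pvStep^[j] x := by
  induction j generalizing x with
  | zero => simpa using hx
  | succ j ih =>
    rw [Function.iterate_succ_apply]
    exact ih _ (pvStep_pos x hx)

-- the main simulation: A's loop and B's loop return the same result under pvInv
lemma pvLoop_sim (m : Int) : ∀ (c : Nat) (num : Int) (A T : List Int)
    (maxL : Int) (longest : List Int) (mOpt : Option Int),
    2 ≤ num → num + (c : Int) = m + 1 → pvInv m num A T →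
    pvALoop c num A maxL longest mOpt = pvBLoop m c num T maxL longest mOpt := by
  intro c
  induction c with
  | zero => intro num A T maxL longest mOpt _ _ _; simp [pvALoop, pvBLoop]
  | succ c ih =>
    intro num A T maxL longest mOpt h2 hcnt hInv
    obtain ⟨hAlen, hTlen, hBelow, hGood⟩ := hInv
    have hnm : num ≤ m := by omega
    have hAnat : A.length = num.toNat := by omega
    -- both walks (A's counting one and B's collecting one) analysed through pvBWhile
    by_cases hskip : PySem.List.pyGetD T num 0 = 0
    · -- B walks too: identical chain, then backfill
      cases hw : pvBWhile pvFuel num num [] with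
      | none =>
        have hAW : pvAWhile pvFuel num num 0 = none := by
          rw [pvWalk_sim pvFuel num num 0 [], hw]; rfl
        simp only [pvALoop, pvBLoop, pvLenNth, hAW, hw, if_pos hskip]
      | some r =>
        obtain ⟨path, t⟩ := r
        obtain ⟨S, hSf, hpath, ht, hmid, htlt⟩ := pvBWhile_iter pvFuel num num [] path t hw
        simp only [List.nil_append] at hpath
        have hplenN : path.length = S := by rw [hpath]; simp
        have hAW : pvAWhile pvFuel num num 0 = some (t, (S : Int)) := by
          rw [pvWalk_sim pvFuel num num 0 [], hw]
          simp [hplenN]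
        have ht1 : 1 ≤ t := by rw [ht]; exact pvIter_pos S num (by omega)
        have hS1 : 1 ≤ S := by
          rcases Nat.eq_zero_or_pos S with h0 | h; · rw [h0] at ht; simp at ht; omega
          · exact h
        obtain ⟨hTA_t, hR1t⟩ := hBelow t ht1 htlt
        have hL : pvLenNth num A = some ((S : Int) + PySem.List.pyGetD A t 0) := by
          unfold pvLenNth; rw [hAW]
        -- the backfill call, reshaped to pvBackfill_spec's form
        have hcall : pvBackfill m path.reverse (PySem.List.pyGetD T t 0) T
            = pvBackfill m (((List.range S).map (fun i => pvStep^[i] num)).reverse)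
                (PySem.List.pyGetD T t 0 + ((S - S : Nat) : Int)) T := by
          rw [hpath]; simp
        obtain ⟨hbl, hbg, hbu, hbn⟩ := pvBackfill_spec m num t (PySem.List.pyGetD T t 0) S
          h2 hnm hSf ht.symm htlt (by rw [hTA_t]; exact hR1t)
          (fun i hi => hmid i hi) S (le_refl S) T hTlen hGood
        set T' := pvBackfill m (((List.range S).map (fun i => pvStep^[i] num)).reverse)
          (PySem.List.pyGetD T t 0 + ((S - S : Nat) : Int)) T with hT'
        have hT'num : PySem.List.pyGetD T' num 0 = (S : Int) + PySem.List.pyGetD A t 0 := by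
          rw [hbn hS1, hTA_t]; ring
        have hInv' : pvInv m (num + 1) (A ++ [(S : Int) + PySem.List.pyGetD A t 0]) T' := by
          refine ⟨by simp [hAnat]; omega, by rw [hbl]; exact hTlen, ?_, hbg⟩
          intro k hk1 hklt
          by_cases hkn : k < num
          · have hknat : k.toNat < A.length := by omega
            have hA' : PySem.List.pyGetD (A ++ [(S : Int) + PySem.List.pyGetD A t 0]) k 0
                = PySem.List.pyGetD A k 0 := pvPyGetDAppendLt A _ k (by omega) hknat
            rw [hA', hbu k (by omega) hkn]
            exact hBelow k hk1 hkn
          · have hkeq : k = num := by omega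
            subst hkeq
            have hA' : PySem.List.pyGetD (A ++ [(S : Int) + PySem.List.pyGetD A t 0]) k 0
                = (S : Int) + PySem.List.pyGetD A t 0 := pvPyGetDAppendSelf A _ k (by omega) (by omega)
            rw [hA', hT'num]
            refine ⟨rfl, ?_⟩
            have := pvR1_iter S k (PySem.List.pyGetD A t 0)
              (fun i hi => by have := hmid i hi; omega) (by rw [← ht]; exact hR1t)
            simpa [add_comm] using this
        simp only [pvALoop, pvBLoop, hL, if_pos hskip, hw, hcall, hT'num]
        by_cases hrec : (S : Int) + PySem.List.pyGetD A t 0 ≥ maxL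
        · simp only [if_pos hrec]
          rw [pvSetNonneg longest num num (by omega), pvSetNonneg _ num num (by omega),
            List.set_set]
          have := ih (num + 1) (A ++ [(S : Int) + PySem.List.pyGetD A t 0]) T'
            ((S : Int) + PySem.List.pyGetD A t 0)
            (PySem.List.pySetD longest num num) (some num) (by omega) (by omega) hInv'
          rw [pvSetNonneg longest num num (by omega)] at this
          exact this
        · simp only [if_neg hrec]
          cases mOpt with
          | none => rfl
          | some mm =>
            exact ih (num + 1) _ T' maxL (PySem.List.pySetD longest num mm) (some mm)
              (by omega) (by omega) hInv'
    · -- B skips: the table already holds num's canonical length; A still walks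
      obtain ⟨hR1T, j, hjF, hjlt⟩ := hGood num h2 hnm hskip
      obtain ⟨r, hw⟩ := pvBWhile_some_of_iter pvFuel num num [] ⟨j, hjF, hjlt⟩
      obtain ⟨path, t⟩ := r
      obtain ⟨S, hSf, hpath, ht, hmid, htlt⟩ := pvBWhile_iter pvFuel num num [] path t hw
      simp only [List.nil_append] at hpath
      have hplenN : path.length = S := by rw [hpath]; simp
      have hAW : pvAWhile pvFuel num num 0 = some (t, (S : Int)) := by
        rw [pvWalk_sim pvFuel num num 0 [], hw]
        simp [hplenN]
      have ht1 : 1 ≤ t := by rw [ht]; exact pvIter_pos S num (by omega)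
      obtain ⟨hTA_t, hR1t⟩ := hBelow t ht1 htlt
      have hL : pvLenNth num A = some ((S : Int) + PySem.List.pyGetD A t 0) := by
        unfold pvLenNth; rw [hAW]
      have hR1num : pvR1 num ((S : Int) + PySem.List.pyGetD A t 0) := by
        have := pvR1_iter S num (PySem.List.pyGetD A t 0)
          (fun i hi => by have := hmid i hi; omega) (by rw [← ht]; exact hR1t)
        simpa [add_comm] using this
      have hTnum : PySem.List.pyGetD T num 0 = (S : Int) + PySem.List.pyGetD A t 0 :=
        pvR1_unique num _ _ hR1T hR1num
      have hInv' : pvInv m (num + 1) (A ++ [(S : Int) + PySem.List.pyGetD A t 0]) T := by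
        refine ⟨by simp [hAnat]; omega, hTlen, ?_, hGood⟩
        intro k hk1 hklt
        by_cases hkn : k < num
        · have hknat : k.toNat < A.length := by omega
          have hA' : PySem.List.pyGetD (A ++ [(S : Int) + PySem.List.pyGetD A t 0]) k 0
              = PySem.List.pyGetD A k 0 := pvPyGetDAppendLt A _ k (by omega) hknat
          rw [hA']
          exact hBelow k hk1 hkn
        · have hkeq : k = num := by omega
          subst hkeq
          have hA' : PySem.List.pyGetD (A ++ [(S : Int) + PySem.List.pyGetD A t 0]) k 0
              = (S : Int) + PySem.List.pyGetD A t 0 := pvPyGetDAppendSelf A _ k (by omega) (by omega)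
          rw [hA', hTnum]
          exact ⟨rfl, hR1num⟩
      simp only [pvALoop, pvBLoop, hL]
      rw [if_neg hskip]
      dsimp only
      simp only [hTnum]
      by_cases hrec : (S : Int) + PySem.List.pyGetD A t 0 ≥ maxL
      · simp only [if_pos hrec]
        rw [pvSetNonneg longest num num (by omega), pvSetNonneg _ num num (by omega),
          List.set_set]
        have := ih (num + 1) (A ++ [(S : Int) + PySem.List.pyGetD A t 0]) T
          ((S : Int) + PySem.List.pyGetD A t 0)
          (PySem.List.pySetD longest num num) (some num) (by omega) (by omega) hInv'
        rw [pvSetNonneg longest num num (by omega)] at this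
        exact this
      · simp only [if_neg hrec]
        cases mOpt with
        | none => rfl
        | some mm =>
          exact ih (num + 1) _ T maxL (PySem.List.pySetD longest num mm) (some mm)
            (by omega) (by omega) hInv'

lemma pvGetDRepl (n i : Nat) : (List.replicate n (0 : Int)).getD i 0 = 0 := by
  cases h : decide (i < n) <;> simp_all [List.getD]

-- ===== VERDICT (by name: the statement is the Claim_ definition above) =====
theorem length_of_sequence_all_spec : Claim_equal_length_of_sequence_all := by
  intro max_val _ hpre
  have hp1 : 1 ≤ max_val := hpre
  unfold Spec_length_of_sequence_all
  unfold length_of_sequence_all length_of_sequence_all_alt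
  have hzl : (List.replicate (max_val + 1).toNat (0 : Int)).length = (max_val + 1).toNat := by
    simp
  have h1lt : 1 < (List.replicate (max_val + 1).toNat (0 : Int)).length := by
    rw [hzl]; omega
  have hset : PySem.List.pySet? (List.replicate (max_val + 1).toNat (0 : Int)) 1 1 =
      some ((List.replicate (max_val + 1).toNat (0 : Int)).set 1 1) := by
    have := PySem.List.pySet?_natCast (xs := List.replicate (max_val + 1).toNat (0 : Int))
      (n := 1) (v := (1 : Int)) h1lt
    simpa using this
  rw [hset]
  have hsetD : PySem.List.pySetD (List.replicate (max_val + 1).toNat (0 : Int)) 1 (1 : Int) =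
      (List.replicate (max_val + 1).toNat (0 : Int)).set 1 1 := by
    rw [pvSetNonneg _ _ _ (by norm_num : (0:Int) ≤ 1)]
    norm_num
  rw [hsetD]
  set T0 := (List.replicate (max_val + 1).toNat (0 : Int)).set 1 1 with hT0
  have hT0len : (T0.length : Int) = max_val + 1 := by
    rw [hT0]; simp [hzl]; omega
  have hInv0 : pvInv max_val 2 [0, 1] T0 := by
    refine ⟨by norm_num, hT0len, ?_, ?_⟩
    · intro k hk1 hk2
      have hk : k = 1 := by omega
      subst hk
      have h1 : PySem.List.pyGetD T0 1 0 = 1 := by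
        rw [pvGetNonneg _ _ _ (by norm_num)]
        have : (1 : Int).toNat = 1 := rfl
        rw [this, hT0, pvGetDSetSelf _ _ _ _ h1lt]
      have h2 : PySem.List.pyGetD ([0, 1] : List Int) 1 0 = 1 := by
        rw [pvGetNonneg _ _ _ (by norm_num)]
        rfl
      rw [h1, h2]
      exact ⟨rfl, pvR1_one⟩
    · intro k hk2 hkm hne
      exfalso
      apply hne
      rw [pvGetNonneg _ _ _ (by omega), hT0,
        pvGetDSetNe _ _ _ _ _ (by omega : (1:Nat) ≠ k.toNat), pvGetDRepl]
  dsimp only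
  rw [pvLoop_sim max_val (max_val - 1).toNat 2 [0, 1] T0 0 T0 none (by norm_num)
    (by omega) hInv0]
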